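-- pv_equiv track=rewrite | github.com/ratem/bart.dias | tests/examples/pipeline/three_stage_pipeline.py | three_stage_pipeline
-- ===== SOURCE A (Python) =====
-- def three_stage_pipeline(data):
--     # Stage 1: Generate data
--     buffer1 = []
--     for item in data:
--         buffer1.append(item * 2)
--
--     # Stage 2: Transform data
--     buffer2 = []
--     for item in buffer1:
--         buffer2.append(item + 10)
--
--     # Stage 3: Process data
--     results = []
--     for item in buffer2:
--         results.append(item * 3)
--
--     return results
-- ===== SOURCE B (Python) =====
-- def three_stage_pipeline(data):
--     # One fused pass: apply all three stages per element, no intermediate buffers.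
--     results = []
--     for item in data:
--         results.append((item * 2 + 10) * 3)
--     return results
-- ===== Notes on version B (the rewrite author's own statement) =====
-- stated objective: simpler
-- what changed: Fused the three sequential passes (each materializing an intermediate list) into a single loop that computes (item*2+10)*3 per element with no intermediate buffers.
import Mathlib
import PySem

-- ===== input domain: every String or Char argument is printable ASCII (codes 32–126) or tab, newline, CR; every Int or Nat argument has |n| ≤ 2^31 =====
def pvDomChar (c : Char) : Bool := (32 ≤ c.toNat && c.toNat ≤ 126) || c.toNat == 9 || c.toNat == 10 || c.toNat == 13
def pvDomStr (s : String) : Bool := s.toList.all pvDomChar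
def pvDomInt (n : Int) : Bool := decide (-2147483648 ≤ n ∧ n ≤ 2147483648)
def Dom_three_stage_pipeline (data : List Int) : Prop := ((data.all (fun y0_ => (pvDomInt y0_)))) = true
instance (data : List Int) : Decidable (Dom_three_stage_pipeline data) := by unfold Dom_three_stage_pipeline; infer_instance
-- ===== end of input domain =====

-- B fuses A's three sequential passes (two intermediate buffers) into one loop computing (item*2+10)*3 per element; objective: simpler.

-- ===== PORT A =====
-- three folds, each appending to its own buffer, exactly as A's three loops
def three_stage_pipeline (data : List Int) : List Int :=
  let buffer1 := data.foldl (fun acc item => acc ++ [item * 2]) []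
  let buffer2 := buffer1.foldl (fun acc item => acc ++ [item + 10]) []
  let results := buffer2.foldl (fun acc item => acc ++ [item * 3]) []
  results

-- ===== PORT B =====
-- single loop appending the fused value
def three_stage_pipeline_alt (data : List Int) : List Int :=
  data.foldl (fun results item => results ++ [(item * 2 + 10) * 3]) []

-- ===== PRECONDITION & SPEC =====
def Spec_three_stage_pipeline (data : List Int) (out : List Int) : Prop := out = three_stage_pipeline_alt data
instance (data : List Int) (out : List Int) : Decidable (Spec_three_stage_pipeline data out) := by unfold Spec_three_stage_pipeline; infer_instance

-- ===== CLAIM (what is proved, stated in full; the proofs are below) =====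
def Claim_equal_three_stage_pipeline : Prop := ∀ (data : List Int), Dom_three_stage_pipeline data → Spec_three_stage_pipeline data (three_stage_pipeline data)

-- ===== LEMMAS AND PROOFS =====

-- an append-fold is a map
theorem pv_foldl_append_map (f : Int → Int) (xs : List Int) (acc : List Int) :
    xs.foldl (fun a i => a ++ [f i]) acc = acc ++ xs.map f := by
  induction xs generalizing acc with
  | nil => simp
  | cons x xs ih => simp [List.foldl, ih]

-- ===== VERDICT (by name: the statement is the Claim_ definition above) =====
theorem three_stage_pipeline_spec : Claim_equal_three_stage_pipeline := by
  intro data _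
  unfold Spec_three_stage_pipeline three_stage_pipeline three_stage_pipeline_alt
  simp only [pv_foldl_append_map, List.nil_append, List.map_map]
  congr 1
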